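-- pv_equiv track=rewrite | github.com/ramanaprabhusana/epidemiology-data-tool | src/evidence_finder/connectors/link_value_extractor.py | _dedupe_and_format
-- ===== SOURCE A (Python) =====
-- from typing import List, Optional, Tuple, Set, Dict, Any
--
-- def _dedupe_and_format(found: List[Tuple[str, str]], max_values: int = 50) -> Optional[str]:
--     seen_vals = set()
--     ordered = []
--     for label in ("incidence", "prevalence", "cases", "rate", "percent", "mortality", "survival", "value"):
--         for lbl, val in found:
--             if lbl != label:
--                 continue
--             vnorm = val.replace(",", "").replace(" ", "").replace("%", "")
--             if vnorm in seen_vals: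
--                 continue
--             seen_vals.add(vnorm)
--             ordered.append((lbl, val))
--     if not ordered:
--         return None
--     ordered = ordered[:max_values]
--     parts = [f"{v} ({lbl})" for lbl, v in ordered]
--     return "; ".join(parts) if len(parts) > 1 else ordered[0][1]
-- ===== SOURCE B (Python) =====
-- def _dedupe_and_format(found, max_values=50):
--     priority = ("incidence", "prevalence", "cases", "rate", "percent", "mortality", "survival", "value")
--     groups = {}
--     for lbl, val in found:
--         if lbl in priority:
--             groups.setdefault(lbl, []).append((lbl, val))
--     seen_vals = set()
--     ordered = []
--     for label in priority:
--         for lbl, val in groups.get(label, ()):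
--             vnorm = val.replace(",", "").replace(" ", "").replace("%", "")
--             if vnorm not in seen_vals:
--                 seen_vals.add(vnorm)
--                 ordered.append((lbl, val))
--     if not ordered:
--         return None
--     ordered = ordered[:max_values]
--     if len(ordered) == 1:
--         return ordered[0][1]
--     return "; ".join(f"{v} ({lbl})" for lbl, v in ordered)
-- ===== Notes on version B (the rewrite author's own statement) =====
-- stated objective: idiomatic
-- what changed: B builds an insertion-ordered dict grouping (lbl, val) pairs by recognized label in one pass over found, then walks the eight priority labels via table lookup, instead of A's eight repeated full scans of found; the shared dedup set, empty->None check, max_values slice and single-vs-multiple formatting are kept.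
import Mathlib
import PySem

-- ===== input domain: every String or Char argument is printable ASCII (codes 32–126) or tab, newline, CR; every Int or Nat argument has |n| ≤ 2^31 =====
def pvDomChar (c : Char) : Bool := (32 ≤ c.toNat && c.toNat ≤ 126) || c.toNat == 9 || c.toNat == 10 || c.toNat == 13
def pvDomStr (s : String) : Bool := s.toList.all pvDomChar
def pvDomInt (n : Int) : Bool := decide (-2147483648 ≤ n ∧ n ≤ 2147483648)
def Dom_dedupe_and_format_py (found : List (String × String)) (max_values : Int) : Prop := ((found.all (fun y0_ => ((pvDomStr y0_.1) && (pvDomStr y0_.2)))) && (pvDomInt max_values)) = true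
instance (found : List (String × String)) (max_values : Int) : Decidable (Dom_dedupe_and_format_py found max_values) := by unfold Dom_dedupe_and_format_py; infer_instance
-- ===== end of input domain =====

-- B replaces A's eight full scans of `found` (one per priority label) by one grouping
-- pass into an insertion-ordered dict plus a lookup per label (objective: idiomatic).

-- shared vocabulary of both Pythons: the priority-label tuple and the value normalizer
def pvLabels : List String :=
  ["incidence", "prevalence", "cases", "rate", "percent", "mortality", "survival", "value"]

-- val.replace(",", "").replace(" ", "").replace("%", "")
def pvNorm (v : String) : String :=
  PySem.Str.replace (PySem.Str.replace (PySem.Str.replace v "," "") " " "") "%" ""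

-- the dedup step both Pythons perform on a surviving (lbl, val) pair
def pvDedupStep (st : PySem.Set String × List (String × String)) (p : String × String) :
    PySem.Set String × List (String × String) :=
  let vnorm := pvNorm p.2
  if PySem.Set.contains st.1 vnorm then st
  else (PySem.Set.add st.1 vnorm, st.2 ++ [p])

-- ===== PORT A =====
-- A's nested loops: for label in priority: for (lbl, val) in found: skip unless lbl == label
def pvStateA (found : List (String × String)) : PySem.Set String × List (String × String) :=
  pvLabels.foldl
    (fun st label =>
      found.foldl (fun st p => if p.1 ≠ label then st else pvDedupStep st p) st)
    (PySem.Set.empty, [])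

def dedupe_and_format_py (found : List (String × String)) (max_values : Int) : Option String :=
  let ordered := (pvStateA found).2
  if ordered = [] then none
  else
    let ordered2 := PySem.List.slice ordered none (some max_values)
    let parts := ordered2.map (fun p => p.2 ++ " (" ++ p.1 ++ ")")
    if parts.length > 1 then some (PySem.Str.join "; " parts)
    else some ((ordered2.headD ("", "")).2)   -- ordered[0][1]; ordered2 ≠ [] under Pre_

-- ===== PORT B =====
-- one grouping pass: groups.setdefault(lbl, []).append((lbl, val)) for recognized lbl
def pvGroups (found : List (String × String)) :
    PySem.Dict String (List (String × String)) :=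
  found.foldl
    (fun g p => if pvLabels.contains p.1 then g.modify p.1 [] (· ++ [p]) else g)
    PySem.Dict.empty

-- then one walk of each label's group, sharing the global seen set
def pvStateB (found : List (String × String)) : PySem.Set String × List (String × String) :=
  pvLabels.foldl
    (fun st label => ((pvGroups found).getD label []).foldl pvDedupStep st)
    (PySem.Set.empty, [])

def dedupe_and_format_py_alt (found : List (String × String)) (max_values : Int) : Option String :=
  let ordered := (pvStateB found).2
  if ordered = [] then none
  else
    let ordered2 := PySem.List.slice ordered none (some max_values)
    if ordered2.length = 1 then some ((ordered2.headD ("", "")).2)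
    else some (PySem.Str.join "; " (ordered2.map (fun p => p.2 ++ " (" ++ p.1 ++ ")")))

-- ===== PRECONDITION & SPEC =====
-- Pre_ excludes exactly the inputs where Python A raises IndexError: some recognized
-- label occurs (so `ordered` is nonempty, with pvK distinct normalized values) but the
-- ordered[:max_values] slice is empty, making ordered[0] fail.
def pvK (found : List (String × String)) : Nat :=
  (PySem.List.dedup ((found.filter (fun p => pvLabels.contains p.1)).map (fun p => pvNorm p.2))).length

def Pre_dedupe_and_format_py (found : List (String × String)) (max_values : Int) : Prop :=
  ¬ (0 < pvK found ∧ (max_values = 0 ∨ (max_values < 0 ∧ max_values ≤ -(pvK found : Int))))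
instance (found : List (String × String)) (max_values : Int) : Decidable (Pre_dedupe_and_format_py found max_values) := by unfold Pre_dedupe_and_format_py; infer_instance

def pvWitness_dedupe_and_format_py : (List (String × String)) × Int :=
  ([("cases", "1,000"), ("rate", "5%"), ("cases", "1000")], 50)

def Spec_dedupe_and_format_py (found : List (String × String)) (max_values : Int) (out : Option String) : Prop := out = dedupe_and_format_py_alt found max_values
instance (found : List (String × String)) (max_values : Int) (out : Option String) : Decidable (Spec_dedupe_and_format_py found max_values out) := by unfold Spec_dedupe_and_format_py; infer_instance

-- ===== CLAIM (what is proved, stated in full; the proofs are below) =====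
def Claim_equal_dedupe_and_format_py : Prop := ∀ (found : List (String × String)) (max_values : Int), Dom_dedupe_and_format_py found max_values → Pre_dedupe_and_format_py found max_values → Spec_dedupe_and_format_py found max_values (dedupe_and_format_py found max_values)

-- ===== LEMMAS AND PROOFS =====

theorem pv_group_getD (label : String) (hl : pvLabels.contains label = true)
    (found : List (String × String)) (d : PySem.Dict String (List (String × String))) :
    (found.foldl
      (fun g p => if pvLabels.contains p.1 then g.modify p.1 [] (· ++ [p]) else g) d).getD label []
      = d.getD label [] ++ found.filter (fun p => p.1 == label) := by
  induction found generalizing d with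
  | nil => simp
  | cons p t ih =>
    by_cases h : pvLabels.contains p.1 = true
    · simp only [List.foldl_cons, h, if_true, List.filter_cons]
      rw [ih]
      by_cases he : p.1 = label
      · subst he
        rw [PySem.Dict.getD_modify_self]
        simp
      · rw [PySem.Dict.getD_modify]
        simp [he, Ne.symm he]
    · have hne : (p.1 == label) = false := by
        cases hcontr : (p.1 == label) with
        | false => rfl
        | true => exact absurd (by rwa [(beq_iff_eq).mp hcontr]) h
      simp only [List.foldl_cons, h, List.filter_cons, hne]
      exact ih d

theorem pv_stateA_eq_stateB (found : List (String × String)) :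
    pvStateA found = pvStateB found := by
  unfold pvStateA pvStateB
  apply PySem.List.foldl_congr_mem
  intro st label hmem
  have hl : pvLabels.contains label = true := List.contains_iff_mem.mpr hmem
  rw [pvGroups, pv_group_getD label hl, PySem.Dict.getD_empty, List.nil_append]
  rw [← PySem.List.foldl_if_eq_foldl_filter]
  apply PySem.List.foldl_congr_mem
  intro acc p _
  by_cases h : p.1 = label
  · simp [h]
  · simp [h]

theorem pv_tail_eq (found : List (String × String)) (max_values : Int) :
    dedupe_and_format_py found max_values = dedupe_and_format_py_alt found max_values := by
  unfold dedupe_and_format_py dedupe_and_format_py_alt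
  rw [pv_stateA_eq_stateB]
  by_cases h : (pvStateB found).2 = []
  · simp [h]
  · simp only [h, if_false]
    cases hsl : PySem.List.slice (pvStateB found).2 none (some max_values) with
    | nil => simp [PySem.Str.join]
    | cons q rest =>
      cases rest with
      | nil => simp
      | cons r rest' => simp

-- ===== VERDICT (by name: the statement is the Claim_ definition above) =====
theorem dedupe_and_format_py_spec : Claim_equal_dedupe_and_format_py := by
  intro found max_values _ _
  unfold Spec_dedupe_and_format_py
  exact pv_tail_eq found max_values
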